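-- pv_equiv track=rewrite | github.com/windskyer/k_cinder | paxes_cinder/k2aclient/k2asample/tool_ssp_clean.py | _chunks2
-- ===== SOURCE A (Python) =====
-- def _chunks2(l, cs):
--     """ Yield special chunks from l.
--     """
--     cs = [2, 4, 8, 16, 32, 64]
--     ci = 0
--     lin = 0
--     while True:
--         li = lin
--         if li > (len(l) - 1):
--             break
--         lin = li + cs[ci]
--         ci = (ci + 1) % len(cs)
--         yield l[li:lin]
-- ===== SOURCE B (Python) =====
-- def _chunks2(l, cs):
--     """ Yield special chunks from l.
--     """
--     # Phase 1: compute all chunk boundary offsets up front.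
--     sizes = [2, 4, 8, 16, 32, 64]
--     offsets = [0]
--     i = 0
--     while offsets[-1] < len(l):
--         offsets.append(offsets[-1] + sizes[i % len(sizes)])
--         i += 1
--     # Phase 2: emit the slice between each consecutive pair of offsets.
--     for a, b in zip(offsets, offsets[1:]):
--         yield l[a:b]
-- ===== Notes on version B (the rewrite author's own statement) =====
-- stated objective: alternative
-- what changed: B precomputes the full list of chunk boundary offsets in one pass (cycling the sizes by index arithmetic) and then emits l[a:b] for consecutive offset pairs via zip, instead of A's single interleaved while-loop that slices while it walks.
import Mathlib
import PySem

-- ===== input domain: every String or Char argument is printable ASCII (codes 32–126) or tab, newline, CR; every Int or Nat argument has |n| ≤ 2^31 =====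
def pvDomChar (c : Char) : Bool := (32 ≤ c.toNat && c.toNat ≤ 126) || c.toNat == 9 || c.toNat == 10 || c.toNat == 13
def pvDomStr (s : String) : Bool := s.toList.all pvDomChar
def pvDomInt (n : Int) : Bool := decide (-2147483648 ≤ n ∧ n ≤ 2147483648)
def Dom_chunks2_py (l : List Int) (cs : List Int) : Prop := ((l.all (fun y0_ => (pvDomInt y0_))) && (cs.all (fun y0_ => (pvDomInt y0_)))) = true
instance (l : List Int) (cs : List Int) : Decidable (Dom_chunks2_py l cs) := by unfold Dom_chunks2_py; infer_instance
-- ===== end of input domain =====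

-- B computes the chunk boundary offsets first and then slices consecutive pairs,
-- instead of A's interleaved indexed while-loop; same cost, different decomposition.

-- ===== PORT A =====
-- cs is reassigned to this constant list on entry in A
def csA : List Int := [2, 4, 8, 16, 32, 64]

-- the while-True loop of A; fuel = l.length + 1 is a totality guard only
-- (each iteration starts at li < l.length and advances lin by at least 2,
-- so the Python loop runs fewer than l.length + 1 iterations).
-- ci is always < 6, so `csA.getD ci 0` is exactly Python's cs[ci].
def chunksA_loop (l : List Int) (ci : Nat) (lin : Int) : Nat → List (List Int)
  | 0 => []
  | fuel + 1 =>
    let li := lin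
    if li > (l.length : Int) - 1 then []
    else
      let lin' := li + csA.getD ci 0
      let ci' := (ci + 1) % csA.length
      PySem.List.slice l li lin' :: chunksA_loop l ci' lin' fuel

def chunks2_py (l : List Int) (cs : List Int) : List (List Int) :=
  chunksA_loop l 0 0 (l.length + 1)

-- ===== PORT B =====
def sizesB : List Int := [2, 4, 8, 16, 32, 64]

-- the offsets after the initial 0: while offsets[-1] < len(l), append last + sizes[i % 6].
-- fuel = l.length + 1 is a totality guard only (same bound as A's loop).
def offsetsB_loop (n : Nat) (last : Int) (i : Nat) : Nat → List Int
  | 0 => []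
  | fuel + 1 =>
    if last < (n : Int) then
      let nxt := last + sizesB.getD (i % sizesB.length) 0
      nxt :: offsetsB_loop n nxt (i + 1) fuel
    else []

def chunks2_py_alt (l : List Int) (cs : List Int) : List (List Int) :=
  let offsets := 0 :: offsetsB_loop l.length 0 0 (l.length + 1)
  (offsets.zip offsets.tail).map (fun p => PySem.List.slice l p.1 p.2)

-- ===== PRECONDITION & SPEC =====
def Spec_chunks2_py (l : List Int) (cs : List Int) (out : List (List Int)) : Prop := out = chunks2_py_alt l cs
instance (l : List Int) (cs : List Int) (out : List (List Int)) : Decidable (Spec_chunks2_py l cs out) := by unfold Spec_chunks2_py; infer_instance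

-- ===== CLAIM (what is proved, stated in full; the proofs are below) =====
def Claim_equal_chunks2_py : Prop := ∀ (l : List Int) (cs : List Int), Dom_chunks2_py l cs → Spec_chunks2_py l cs (chunks2_py l cs)

-- ===== LEMMAS AND PROOFS =====

-- core lemma: A's interleaved loop equals B's zip-of-offsets, for any start state,
-- relating A's pre-reduced cycle index (i % 6) to B's raw counter i.
theorem loop_eq (l : List Int) : ∀ (fuel : Nat) (i : Nat) (lin : Int),
    chunksA_loop l (i % 6) lin fuel =
      ((lin :: offsetsB_loop l.length lin i fuel).zip
        (offsetsB_loop l.length lin i fuel)).map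
        (fun p => PySem.List.slice l p.1 p.2) := by
  intro fuel
  induction fuel with
  | zero => intro i lin; simp [chunksA_loop, offsetsB_loop]
  | succ fuel ih =>
    intro i lin
    by_cases h : lin > (l.length : Int) - 1
    · have h' : ¬ lin < (l.length : Int) := by omega
      simp [chunksA_loop, offsetsB_loop, h, h']
    · have h' : lin < (l.length : Int) := by omega
      have hm : (i % 6 + 1) % 6 = (i + 1) % 6 := by omega
      simp only [chunksA_loop, offsetsB_loop, h, h', if_pos]
      have hsz : csA.getD (i % 6) 0 = sizesB.getD (i % 6) 0 := rfl
      have hlen : csA.length = 6 := rfl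
      simp only [hsz, hlen, hm]
      rw [ih (i + 1) (lin + sizesB.getD (i % 6) 0)]
      simp [sizesB]

-- ===== VERDICT (by name: the statement is the Claim_ definition above) =====
theorem chunks2_py_spec : Claim_equal_chunks2_py := by
  intro l cs _
  unfold Spec_chunks2_py chunks2_py chunks2_py_alt
  have := loop_eq l (l.length + 1) 0 0
  simpa using this
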